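-- pv_equiv track=rewrite | github.com/oVirt/ovirt-host-deploy | src/plugins/ovirt-host-deploy/vdsm/pki.py | _getChainOpenSSL
-- ===== SOURCE A (Python) =====
-- def _getChainOpenSSL(chain):
--     """perform primitive loop"""
--     cacert = ''
--     vdsmchain = ''
--     inca = True
--     for line in chain:
--         if inca:
--             cacert += line + '\n'
--         else:
--             vdsmchain += line + '\n'
--         if line.find('-END CERTIFICATE-') != -1:
--             inca = False
--
--     return (cacert, vdsmchain)
-- ===== SOURCE B (Python) =====
-- def _getChainOpenSSL(chain):
--     """split at the line just past the first '-END CERTIFICATE-' marker"""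
--     lines = list(chain)
--     split = len(lines)
--     for i, line in enumerate(lines):
--         if '-END CERTIFICATE-' in line:
--             split = i + 1
--             break
--     cacert = ''.join(l + '\n' for l in lines[:split])
--     vdsmchain = ''.join(l + '\n' for l in lines[split:])
--     return (cacert, vdsmchain)
-- ===== Notes on version B (the rewrite author's own statement) =====
-- stated objective: alternative
-- what changed: Instead of a per-line boolean flag toggled inside one accumulating loop, B first locates the split index (just past the first line containing '-END CERTIFICATE-', with break) and then builds the two halves by slicing and joining.
import Mathlib
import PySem

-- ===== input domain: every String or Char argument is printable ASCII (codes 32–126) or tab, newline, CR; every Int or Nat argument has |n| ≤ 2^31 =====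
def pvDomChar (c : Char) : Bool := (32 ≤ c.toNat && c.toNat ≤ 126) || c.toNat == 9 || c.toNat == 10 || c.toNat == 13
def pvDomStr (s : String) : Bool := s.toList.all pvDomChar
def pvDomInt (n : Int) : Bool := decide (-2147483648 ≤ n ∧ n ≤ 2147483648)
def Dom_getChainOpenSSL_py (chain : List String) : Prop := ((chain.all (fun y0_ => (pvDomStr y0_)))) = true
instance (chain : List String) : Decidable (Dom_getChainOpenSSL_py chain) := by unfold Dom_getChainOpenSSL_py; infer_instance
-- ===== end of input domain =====

-- B locates the split index first (just past the first '-END CERTIFICATE-' line), then slices and joins,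
-- instead of A's flag-toggling accumulator loop; same cost, different decomposition.


-- ===== PORT A =====
-- A's loop body: append to cacert or vdsmchain by the flag, then clear the flag on a marker line.
def pvABody (s : String × String × Bool) (line : String) : String × String × Bool :=
  let ca := if s.2.2 then s.1 ++ line ++ "\n" else s.1
  let vd := if s.2.2 then s.2.1 else s.2.1 ++ line ++ "\n"
  let inca := if PySem.Str.find line "-END CERTIFICATE-" ≠ -1 then false else s.2.2
  (ca, vd, inca)

def getChainOpenSSL_py (chain : List String) : String × String :=
  let st := chain.foldl pvABody ("", "", true)
  (st.1, st.2.1)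

-- ===== PORT B =====
-- index just past the first marker line (length of the list if none)
def pvFindSplit : List String → Nat
  | [] => 0
  | l :: rest => if PySem.Str.isIn "-END CERTIFICATE-" l then 1 else 1 + pvFindSplit rest

def pvJoinNl (ls : List String) : String := String.join (ls.map (fun l => l ++ "\n"))

def getChainOpenSSL_py_alt (chain : List String) : String × String :=
  let split := pvFindSplit chain
  (pvJoinNl (chain.take split), pvJoinNl (chain.drop split))

-- ===== PRECONDITION & SPEC =====
def Spec_getChainOpenSSL_py (chain : List String) (out : String × String) : Prop := out = getChainOpenSSL_py_alt chain
instance (chain : List String) (out : String × String) : Decidable (Spec_getChainOpenSSL_py chain out) := by unfold Spec_getChainOpenSSL_py; infer_instance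

-- ===== CLAIM (what is proved, stated in full; the proofs are below) =====
def Claim_equal_getChainOpenSSL_py : Prop := ∀ (chain : List String), Dom_getChainOpenSSL_py chain → Spec_getChainOpenSSL_py chain (getChainOpenSSL_py chain)

-- ===== LEMMAS AND PROOFS =====

theorem pvFoldlAppend (a : String) (xs : List String) :
    xs.foldl (fun r s => r ++ s) a = a ++ xs.foldl (fun r s => r ++ s) "" := by
  induction xs generalizing a with
  | nil => simp
  | cons x xs ih => simp only [List.foldl_cons]; rw [ih, ih ("" ++ x)]; simp [String.append_assoc]

theorem pvJoinNl_cons (l : String) (ls : List String) :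
    pvJoinNl (l :: ls) = l ++ "\n" ++ pvJoinNl ls := by
  simp only [pvJoinNl, String.join, List.map_cons, List.foldl_cons]
  rw [pvFoldlAppend]; simp

-- once the flag is false, everything goes to vdsmchain
theorem pvLoopFalse (rest : List String) (ca vd : String) :
    rest.foldl pvABody (ca, vd, false) = (ca, vd ++ pvJoinNl rest, false) := by
  induction rest generalizing vd with
  | nil => simp [pvJoinNl, String.join]
  | cons l rest ih =>
    simp only [List.foldl_cons, pvABody, if_neg (by simp : ¬ (false : Bool) = true),
      pvJoinNl_cons]
    split
    · rw [ih]; simp [String.append_assoc]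
    · rw [ih]; simp [String.append_assoc]

-- the marker test agrees between the two ports
theorem pvMarker (l : String) :
    (PySem.Str.find l "-END CERTIFICATE-" ≠ -1) ↔ PySem.Str.isIn "-END CERTIFICATE-" l = true := by
  rw [PySem.Str.find_ne_neg_one_iff, PySem.Str.isIn_iff_infix]

theorem pvLoopTrue (rest : List String) (ca vd : String) :
    ((rest.foldl pvABody (ca, vd, true)).1, (rest.foldl pvABody (ca, vd, true)).2.1)
      = (ca ++ pvJoinNl (rest.take (pvFindSplit rest)),
         vd ++ pvJoinNl (rest.drop (pvFindSplit rest))) := by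
  induction rest generalizing ca vd with
  | nil => simp [pvJoinNl, String.join]
  | cons l rest ih =>
    by_cases h : PySem.Str.isIn "-END CERTIFICATE-" l = true
    · have hf : PySem.Str.find l "-END CERTIFICATE-" ≠ -1 := (pvMarker l).mpr h
      simp only [List.foldl_cons, pvABody, if_pos hf]
      rw [pvLoopFalse]
      simp only [pvFindSplit, h, if_pos]
      simp [pvJoinNl, String.join, String.append_assoc]
    · have hf : ¬ (PySem.Str.find l "-END CERTIFICATE-" ≠ -1) := fun hc => h ((pvMarker l).mp hc)
      simp only [List.foldl_cons, pvABody, if_neg hf]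
      rw [ih]
      simp only [pvFindSplit, h, if_false, Bool.false_eq_true, Nat.add_comm 1 (pvFindSplit rest)]
      simp [List.take_succ_cons, List.drop_succ_cons, pvJoinNl_cons, String.append_assoc]

-- ===== VERDICT (by name: the statement is the Claim_ definition above) =====
theorem getChainOpenSSL_py_spec : Claim_equal_getChainOpenSSL_py := by
  intro chain _
  show _ = _
  unfold getChainOpenSSL_py getChainOpenSSL_py_alt
  have := pvLoopTrue chain "" ""
  simp only [] at this ⊢
  rw [this]
  simp
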